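-- pv_equiv track=rewrite | github.com/Over-eng52/ST-Laba1 | Структуры_данных_лаба1/lab1.py | min_n
-- ===== SOURCE A (Python) =====
-- def prime_factors(n):
--     """ Возвращает словарь простых множителей числа n и их степеней. """
--     factors = {}
--     d = 2
--     while d * d <= n:
--         while (n % d) == 0:
--             if d in factors:
--                 factors[d] += 1
--             else:
--                 factors[d] = 1
--             n //= d
--         d += 1
--     if n > 1:
--         factors[n] = 1
--     return factors
--
-- def min_n(A, B):
--     A_factors = prime_factors(A)
--     B_factors = prime_factors(B)
--
--     n = 0
--     for p, a_count in A_factors.items():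
--         if p not in B_factors:
--             return -1  # Если p не является простым множителем B, то B^n не может делиться на A
--         b_count = B_factors[p]
--         # Нам нужно, чтобы b_count * n >= a_count
--         # Следовательно, n >= a_count / b_count
--         required_n = (a_count + b_count - 1) // b_count  # Округляем вверх
--         n = max(n, required_n)
--
--     return n
-- ===== SOURCE B (Python) =====
-- def _gcd(x, y):
--     while y:
--         x, y = y, x % y
--     return x
--
-- def min_n(A, B):
--     # Numbers below 2 have no prime factors: nothing to cover / nothing to cover with.
--     if A < 2:
--         return 0
--     if B < 2:
--         return -1
--     # Repeatedly strip from A everything B can supply in one more power of B: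
--     # after k divisions by gcd(a, B), each prime exponent of A has dropped by
--     # k * (its exponent in B), so the number of iterations until a == 1 is
--     # exactly max_p ceil(e_A(p) / e_B(p)); a leftover coprime part means -1.
--     n = 0
--     a = A
--     while a > 1:
--         g = _gcd(a, B)
--         if g == 1:
--             return -1
--         a //= g
--         n += 1
--     return n
-- ===== Notes on version B (the rewrite author's own statement) =====
-- stated objective: faster
-- what changed: A trial-divides both A and B into two prime-exponent dicts and merges them with per-prime ceiling divisions; B never factors anything: it repeatedly divides A by gcd(A, B) until A reaches 1, counting iterations (the k-th pass removes min(e_A(p), k*e_B(p)) of every prime, so the iteration count is exactly max_p ceil(e_A(p)/e_B(p)), with -1 when a part of A coprime to B remains).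
import Mathlib
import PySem

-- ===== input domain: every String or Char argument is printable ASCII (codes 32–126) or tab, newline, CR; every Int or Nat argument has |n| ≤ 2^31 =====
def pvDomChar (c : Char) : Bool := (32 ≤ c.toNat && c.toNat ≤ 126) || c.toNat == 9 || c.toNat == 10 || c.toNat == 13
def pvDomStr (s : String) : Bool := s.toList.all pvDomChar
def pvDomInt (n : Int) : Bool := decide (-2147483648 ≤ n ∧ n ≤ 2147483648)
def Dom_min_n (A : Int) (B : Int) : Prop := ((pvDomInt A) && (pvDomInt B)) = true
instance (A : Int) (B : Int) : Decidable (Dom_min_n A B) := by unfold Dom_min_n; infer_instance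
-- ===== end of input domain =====

-- B replaces A's two trial-division factorizations (merged through exponent dicts) by a
-- factorization-free gcd chain: repeatedly divide A by gcd(A, B), counting iterations.

-- termination helpers for the loop ports (cited by name in decreasing_by)
theorem pv_toNat_div_lt (x p : Int) (h : 1 ≤ x ∧ 2 ≤ p ∧ PySem.Int.mod x p = 0) :
    (PySem.Int.floordiv x p).toNat < x.toNat := by
  obtain ⟨h1, h2, h3⟩ := h
  have hfd : PySem.Int.floordiv x p = x / p := PySem.Int.floordiv_eq_ediv_of_pos (by omega)
  have hlt : x / p < x := (Int.ediv_lt_iff_lt_mul (by omega)).2 (by nlinarith)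
  have hge : 0 ≤ x / p := Int.ediv_nonneg (by omega) (by omega)
  rw [hfd]; omega

theorem pv_toNat_sub_lt (a a' d : Int) (h : d * d ≤ a ∧ 2 ≤ d) (hle : a' ≤ a) :
    (a' - (d + 1)).toNat < (a - d).toNat := by
  obtain ⟨h1, h2⟩ := h
  have : d < a := by nlinarith
  omega

-- ===== PORT A =====
-- inner `while (n % d) == 0` loop of prime_factors (the `1 ≤ n` and `2 ≤ d` conjuncts
-- are pure totality guards: every call site satisfies them and the loop preserves them)
def pfInner (n d : Int) (f : PySem.Dict Int Int) : Int × PySem.Dict Int Int :=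
  if h : 1 ≤ n ∧ 2 ≤ d ∧ PySem.Int.mod n d = 0 then
    let f' := match f.get? d with
      | some c => f.insert d (c + 1)
      | none => f.insert d 1
    pfInner (PySem.Int.floordiv n d) d f'
  else (n, f)
termination_by n.toNat
decreasing_by exact pv_toNat_div_lt n d h

-- cited by pfOuter's decreasing_by
theorem pfInner_fst_le (n d : Int) (f : PySem.Dict Int Int) : (pfInner n d f).1 ≤ n := by
  induction n, f using pfInner.induct d with
  | case1 n f h f' ih =>
    rw [pfInner, dif_pos h]
    obtain ⟨h1, h2, h3⟩ := h
    have hfd : PySem.Int.floordiv n d = n / d := PySem.Int.floordiv_eq_ediv_of_pos (by omega)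
    have hlt : n / d < n := (Int.ediv_lt_iff_lt_mul (by omega)).2 (by nlinarith)
    exact le_trans ih (by rw [hfd]; omega)
  | case2 n f h => rw [pfInner, dif_neg h]

-- outer `while d * d <= n` loop (the `2 ≤ d` conjunct is a totality guard: d starts at 2)
def pfOuter (n d : Int) (f : PySem.Dict Int Int) : Int × PySem.Dict Int Int :=
  if h : d * d ≤ n ∧ 2 ≤ d then
    pfOuter (pfInner n d f).1 (d + 1) (pfInner n d f).2
  else (n, f)
termination_by (n - d).toNat
decreasing_by exact pv_toNat_sub_lt n (pfInner n d f).1 d h (pfInner_fst_le n d f)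

def prime_factors (n : Int) : PySem.Dict Int Int :=
  if 1 < (pfOuter n 2 PySem.Dict.empty).1 then
    (pfOuter n 2 PySem.Dict.empty).2.insert (pfOuter n 2 PySem.Dict.empty).1 1
  else (pfOuter n 2 PySem.Dict.empty).2

-- the `for p, a_count in A_factors.items()` loop of min_n
def mnLoop (items : List (Int × Int)) (bf : PySem.Dict Int Int) (n : Int) : Int :=
  match items with
  | [] => n
  | (p, ac) :: rest =>
    match bf.get? p with
    | none => -1
    | some bc => mnLoop rest bf (max n (PySem.Int.floordiv (ac + bc - 1) bc))

def min_n (A : Int) (B : Int) : Int :=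
  mnLoop (prime_factors A).items (prime_factors B) 0

-- ===== PORT B =====
-- `_gcd(x, y)`: Euclid's algorithm, `while y: x, y = y, x % y`
def gcdLoop (x y : Int) : Int :=
  if h : y ≠ 0 then gcdLoop y (PySem.Int.mod x y) else x
termination_by y.natAbs
decreasing_by
  rcases lt_or_gt_of_ne h with hy | hy
  · have := PySem.Int.mod_neg_bounds (a := x) hy
    omega
  · have h1 := PySem.Int.mod_nonneg (a := x) hy
    have h2 := PySem.Int.mod_lt (a := x) hy
    omega

-- cited by chainLoop's decreasing_by: the gcd of the loop is never 0 when a ≠ 0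
theorem gcdLoop_ne_zero (x y : Int) (h : x ≠ 0 ∨ y ≠ 0) : gcdLoop x y ≠ 0 := by
  induction x, y using gcdLoop.induct with
  | case1 x y hy ih => rw [gcdLoop, dif_pos hy]; exact ih (Or.inl hy)
  | case2 x y hy =>
    rw [gcdLoop, dif_neg hy]
    rcases h with hx | hy' <;> simp_all

-- cited by chainLoop's decreasing_by
theorem pv_chain_dec (a g : Int) (ha : 1 < a) (hg0 : g ≠ 0) (hg1 : g ≠ 1) :
    (PySem.Int.floordiv a g).toNat < a.toNat := by
  rcases lt_or_gt_of_ne hg0 with hg | hg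
  · -- negative g: the floor quotient of a positive a is negative
    have hq := PySem.Int.floordiv_mul_add_mod a g
    have hr := PySem.Int.mod_neg_bounds (a := a) hg
    have : PySem.Int.floordiv a g < 0 := by nlinarith [hq, hr.1, hr.2]
    omega
  · have hg2 : 2 ≤ g := by omega
    have hfd : PySem.Int.floordiv a g = a / g := PySem.Int.floordiv_eq_ediv_of_pos (by omega)
    have hlt : a / g < a := (Int.ediv_lt_iff_lt_mul (by omega)).2 (by nlinarith)
    have hge : 0 ≤ a / g := Int.ediv_nonneg (by omega) (by omega)
    rw [hfd]; omega

-- `while a > 1` loop of min_n (Source B): divide out gcd(a, B), count the iterations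
def chainLoop (B a n : Int) : Int :=
  if h : 1 < a then
    if hg : gcdLoop a B = 1 then -1
    else chainLoop B (PySem.Int.floordiv a (gcdLoop a B)) (n + 1)
  else n
termination_by a.toNat
decreasing_by exact pv_chain_dec a (gcdLoop a B) h (gcdLoop_ne_zero a B (Or.inl (by omega))) hg

def min_n_alt (A : Int) (B : Int) : Int :=
  if A < 2 then 0
  else if B < 2 then -1
  else chainLoop B A 0

-- ===== PRECONDITION & SPEC =====
def Spec_min_n (A : Int) (B : Int) (out : Int) : Prop := out = min_n_alt A B
instance (A : Int) (B : Int) (out : Int) : Decidable (Spec_min_n A B out) := by unfold Spec_min_n; infer_instance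

-- ===== CLAIM (what is proved, stated in full; the proofs are below) =====
def Claim_equal_min_n : Prop := ∀ (A : Int) (B : Int), Dom_min_n A B → Spec_min_n A B (min_n A B)

-- ===== LEMMAS AND PROOFS =====

-- `a has no divisor in [2, d)` — the trial-division invariant
def NoFac (a d : Int) : Prop := ∀ e : Int, 2 ≤ e → e < d → ¬ e ∣ a

-- "some prime of a is missing from b" / "max over the primes of a of ceil(e_a p / e_b p)"
def badB (b a : ℕ) : Prop := ∃ p ∈ a.primeFactors, b.factorization p = 0
def reqB (b a : ℕ) : ℕ :=
  a.primeFactors.sup (fun p => (a.factorization p + b.factorization p - 1) / b.factorization p)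

-- proof-side mirror of A's inner division loop: strip p out of x, return (rest, count)
def strip (x p : Int) : Int × Int :=
  if h : 1 < x ∧ 2 ≤ p ∧ PySem.Int.mod x p = 0 then
    ((strip (PySem.Int.floordiv x p) p).1, (strip (PySem.Int.floordiv x p) p).2 + 1)
  else (x, 0)
termination_by x.toNat
decreasing_by exact pv_toNat_div_lt x p ⟨le_of_lt h.1, h.2⟩

theorem strip_fst_le (x p : Int) : (strip x p).1 ≤ x := by
  induction x using strip.induct p with
  | case1 x h ih =>
    rw [strip, dif_pos h]
    obtain ⟨h1, h2, h3⟩ := h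
    have hfd : PySem.Int.floordiv x p = x / p := PySem.Int.floordiv_eq_ediv_of_pos (by omega)
    have hlt : x / p < x := (Int.ediv_lt_iff_lt_mul (by omega)).2 (by nlinarith)
    exact le_trans ih (by rw [hfd]; omega)
  | case2 x h => rw [strip, dif_neg h]

-- prime_factors, generalized to an arbitrary starting state (prime_factors n = pfRun n 2 ∅)
def pfRun (n d : Int) (f : PySem.Dict Int Int) : PySem.Dict Int Int :=
  if 1 < (pfOuter n d f).1 then
    (pfOuter n d f).2.insert (pfOuter n d f).1 1
  else (pfOuter n d f).2

theorem prime_factors_eq_pfRun (n : Int) : prime_factors n = pfRun n 2 PySem.Dict.empty := rfl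

-- the items list A's trial division produces, computed directly
def specList (a d : Int) : List (Int × Int) :=
  if h : d * d ≤ a ∧ 2 ≤ d then
    if PySem.Int.mod a d = 0 then
      (d, (strip a d).2) :: specList (strip a d).1 (d + 1)
    else specList a (d + 1)
  else if 1 < a then [(a, 1)] else []
termination_by (a - d).toNat
decreasing_by
  · exact pv_toNat_sub_lt a (strip a d).1 d h (strip_fst_le a d)
  · exact pv_toNat_sub_lt a a d h le_rfl

theorem strip_snd_nonneg (x p : Int) : 0 ≤ (strip x p).2 := by
  induction x using strip.induct p with
  | case1 x h ih => rw [strip, dif_pos h]; omega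
  | case2 x h => rw [strip, dif_neg h]

theorem strip_spec (p : Int) (hp : 2 ≤ p) :
    ∀ x, 1 ≤ x →
      (strip x p).1 * p ^ ((strip x p).2).toNat = x ∧ 1 ≤ (strip x p).1 ∧
        (1 < (strip x p).1 → ¬ p ∣ (strip x p).1) := by
  intro x
  induction x using strip.induct p with
  | case1 x h ih =>
    intro hx
    obtain ⟨h1, h2, h3⟩ := h
    have hdvd : p ∣ x := (PySem.Int.mod_eq_zero_iff_dvd x p).1 h3
    have hfd : PySem.Int.floordiv x p = x / p := PySem.Int.floordiv_eq_ediv_of_pos (by omega)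
    have hx' : 1 ≤ PySem.Int.floordiv x p := by
      rw [hfd]
      have hpx : p ≤ x := Int.le_of_dvd (by omega) hdvd
      rw [Int.le_ediv_iff_mul_le (show (0:Int) < p by omega)]
      omega
    obtain ⟨ih1, ih2, ih3⟩ := ih hx'
    rw [strip, dif_pos ⟨h1, h2, h3⟩]
    have hnn := strip_snd_nonneg (PySem.Int.floordiv x p) p
    refine ⟨?_, ih2, ih3⟩
    have htn : ((strip (PySem.Int.floordiv x p) p).2 + 1).toNat
        = ((strip (PySem.Int.floordiv x p) p).2).toNat + 1 := by omega
    rw [htn, pow_succ, ← mul_assoc, ih1, hfd]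
    exact Int.ediv_mul_cancel hdvd
  | case2 x h =>
    intro hx
    rw [strip, dif_neg h]
    refine ⟨by simp, hx, ?_⟩
    intro hx1 hdvd
    exact h ⟨hx1, hp, (PySem.Int.mod_eq_zero_iff_dvd x p).2 hdvd⟩

theorem strip_snd_eq_zero_iff (p : Int) (hp : 2 ≤ p) (x : Int) (hx : 1 ≤ x) :
    (strip x p).2 = 0 ↔ ¬ p ∣ x := by
  rw [strip]
  split
  · next h =>
    obtain ⟨h1, h2, h3⟩ := h
    have hdvd : p ∣ x := (PySem.Int.mod_eq_zero_iff_dvd x p).1 h3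
    have := strip_snd_nonneg (PySem.Int.floordiv x p) p
    simp only []
    constructor
    · intro hc; omega
    · intro hc; exact absurd hdvd hc
  · next h =>
    simp only []
    constructor
    · intro _ hdvd
      rcases eq_or_lt_of_le hx with he | hlt
      · have : p ≤ 1 := Int.le_of_dvd (by omega) (by rw [← he] at hdvd; exact hdvd)
        omega
      · exact h ⟨hlt, hp, (PySem.Int.mod_eq_zero_iff_dvd x p).2 hdvd⟩
    · intro _; trivial

theorem strip_res_not_dvd (p : Int) (hp : 2 ≤ p) (x : Int) (hx : 1 ≤ x) :
    ¬ p ∣ (strip x p).1 := by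
  obtain ⟨_, h2, h3⟩ := strip_spec p hp x hx
  rcases eq_or_lt_of_le h2 with he | hlt
  · intro hdvd
    have : p ≤ 1 := Int.le_of_dvd (by omega) (by rw [← he] at hdvd; exact hdvd)
    omega
  · exact h3 hlt

theorem strip_self (a : Int) (ha : 2 ≤ a) : (strip a a).2 = 1 := by
  have hmod : PySem.Int.mod a a = 0 := (PySem.Int.mod_eq_zero_iff_dvd a a).2 dvd_rfl
  rw [strip, dif_pos ⟨by omega, by omega, hmod⟩]
  have hfd : PySem.Int.floordiv a a = a / a := PySem.Int.floordiv_eq_ediv_of_pos (by omega)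
  have hone : PySem.Int.floordiv a a = 1 := by rw [hfd]; exact Int.ediv_self (by omega)
  rw [hone, strip, dif_neg (by omega)]
  norm_num

-- exponent counted by the inner loop = Nat.factorization (for a prime p)
theorem strip_count_eq_factorization (p : Int) (hp : 2 ≤ p) (hpp : p.toNat.Prime) :
    ∀ x, 1 ≤ x → ((strip x p).2).toNat = x.toNat.factorization p.toNat := by
  intro x
  induction x using strip.induct p with
  | case1 x h ih =>
    intro hx
    obtain ⟨h1, h2, h3⟩ := h
    have hdvd : p ∣ x := (PySem.Int.mod_eq_zero_iff_dvd x p).1 h3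
    have hfd : PySem.Int.floordiv x p = x / p := PySem.Int.floordiv_eq_ediv_of_pos (by omega)
    have hx' : 1 ≤ PySem.Int.floordiv x p := by
      rw [hfd]
      have hpx : p ≤ x := Int.le_of_dvd (by omega) hdvd
      rw [Int.le_ediv_iff_mul_le (show (0:Int) < p by omega)]
      omega
    have hmul : PySem.Int.floordiv x p * p = x := by rw [hfd]; exact Int.ediv_mul_cancel hdvd
    have hnatmul : (PySem.Int.floordiv x p).toNat * p.toNat = x.toNat := by
      have : ((PySem.Int.floordiv x p).toNat * p.toNat : Int) = (x.toNat : Int) := by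
        rw [Int.toNat_of_nonneg (by omega), Int.toNat_of_nonneg (by omega),
          Int.toNat_of_nonneg (by omega)]
        exact hmul
      exact_mod_cast this
    have hfac : x.toNat.factorization p.toNat
        = (PySem.Int.floordiv x p).toNat.factorization p.toNat + 1 := by
      rw [← hnatmul, Nat.factorization_mul (by omega) (by omega)]
      simp [hpp.factorization_self]
    rw [strip, dif_pos ⟨h1, h2, h3⟩]
    simp only []
    have hnn := strip_snd_nonneg (PySem.Int.floordiv x p) p
    rw [hfac, ← ih hx']
    omega
  | case2 x h =>
    intro hx
    rw [strip, dif_neg h]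
    simp only []
    rcases eq_or_lt_of_le hx with he | hlt
    · rw [← he]; simp
    · have hnd : ¬ p ∣ x := by
        intro hdvd
        exact h ⟨hlt, hp, (PySem.Int.mod_eq_zero_iff_dvd x p).2 hdvd⟩
      have : ¬ p.toNat ∣ x.toNat := by
        intro hn
        apply hnd
        have : (p.toNat : Int) ∣ (x.toNat : Int) := Int.natCast_dvd_natCast.mpr hn
        rwa [Int.toNat_of_nonneg (by omega), Int.toNat_of_nonneg (by omega)] at this
      rw [Nat.factorization_eq_zero_of_not_dvd this]
      rfl

theorem smallest_divisor_prime (a d : Int) (hd : 2 ≤ d) (ha : 1 ≤ a) (hdvd : d ∣ a)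
    (hnf : NoFac a d) : d.toNat.Prime := by
  by_contra hnp
  have hm := Nat.minFac_prime (show d.toNat ≠ 1 by omega)
  have hmd : d.toNat.minFac ∣ d.toNat := Nat.minFac_dvd _
  have hne : d.toNat.minFac ≠ d.toNat := fun he =>
    hnp (Nat.prime_def_minFac.2 ⟨by omega, he⟩)
  have hlt : d.toNat.minFac < d.toNat := lt_of_le_of_ne (Nat.le_of_dvd (by omega) hmd) hne
  have hdInt : (d.toNat.minFac : Int) ∣ d := by
    have : (d.toNat.minFac : Int) ∣ (d.toNat : Int) := Int.natCast_dvd_natCast.mpr hmd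
    rwa [Int.toNat_of_nonneg (by omega)] at this
  have h2 : (2 : Int) ≤ (d.toNat.minFac : Int) := by exact_mod_cast hm.two_le
  exact hnf _ h2 (by omega) (dvd_trans hdInt hdvd)

theorem leftover_prime (a d : Int) (ha : 1 < a) (hd : 2 ≤ d) (hlt : a < d * d)
    (hnf : NoFac a d) : a.toNat.Prime := by
  by_contra hnp
  have hm := Nat.minFac_prime (show a.toNat ≠ 1 by omega)
  have hsq : a.toNat.minFac ^ 2 ≤ a.toNat := Nat.minFac_sq_le_self (by omega) hnp
  have hmd : a.toNat.minFac ∣ a.toNat := Nat.minFac_dvd _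
  have hma : (a.toNat.minFac : Int) ∣ a := by
    have : (a.toNat.minFac : Int) ∣ (a.toNat : Int) := Int.natCast_dvd_natCast.mpr hmd
    rwa [Int.toNat_of_nonneg (by omega)] at this
  have h2 : (2 : Int) ≤ (a.toNat.minFac : Int) := by exact_mod_cast hm.two_le
  have hsqInt : (a.toNat.minFac : Int) * (a.toNat.minFac : Int) ≤ a := by
    have : ((a.toNat.minFac ^ 2 : ℕ) : Int) ≤ ((a.toNat : ℕ) : Int) := by exact_mod_cast hsq
    rw [Int.toNat_of_nonneg (by omega)] at this
    push_cast at this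
    nlinarith [this]
  have hmltd : (a.toNat.minFac : Int) < d := by nlinarith
  exact hnf _ h2 hmltd hma

theorem nofac_two (a : Int) : NoFac a 2 := by
  intro e he1 he2
  omega

theorem nofac_step (a d : Int) (h : NoFac a d) (hnd : ¬ d ∣ a) : NoFac a (d + 1) := by
  intro e he1 he2 hdvd
  rcases eq_or_lt_of_le (show e ≤ d by omega) with he | hlt
  · exact hnd (he ▸ hdvd)
  · exact h e he1 hlt hdvd

theorem nofac_strip (a d : Int) (ha : 1 ≤ a) (hd : 2 ≤ d) (h : NoFac a d) :
    NoFac (strip a d).1 (d + 1) := by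
  intro e he1 he2 hdvd
  obtain ⟨hmul, hres, _⟩ := strip_spec d hd a ha
  rcases eq_or_lt_of_le (show e ≤ d by omega) with he | hlt
  · exact strip_res_not_dvd d hd a ha (he ▸ hdvd)
  · exact h e he1 hlt (hdvd.trans (Dvd.intro _ hmul))

-- pfInner characterized through strip (general accumulated count c at key d)
theorem pfInner_eq_some (d : Int) (hd : 2 ≤ d) :
    ∀ (k : Nat) (n : Int), n.toNat = k → 1 ≤ n → ∀ (f : PySem.Dict Int Int) (c : Int),
      f.get? d = some c →
      pfInner n d f = ((strip n d).1,
        if (strip n d).2 = 0 then f else f.insert d (c + (strip n d).2)) := by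
  intro k
  induction k using Nat.strong_induction_on with
  | _ k ih =>
    intro n hk hn f c hf
    rw [pfInner]
    by_cases hg : 1 ≤ n ∧ 2 ≤ d ∧ PySem.Int.mod n d = 0
    · rw [dif_pos hg]
      simp only [hf]
      have hdvd : d ∣ n := (PySem.Int.mod_eq_zero_iff_dvd n d).1 hg.2.2
      have hpx : d ≤ n := Int.le_of_dvd (by omega) hdvd
      have hfd : PySem.Int.floordiv n d = n / d := PySem.Int.floordiv_eq_ediv_of_pos (by omega)
      have hn' : 1 ≤ PySem.Int.floordiv n d := by
        rw [hfd]
        rw [Int.le_ediv_iff_mul_le (show (0:Int) < d by omega)]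
        omega
      have hlt : PySem.Int.floordiv n d < n := by
        rw [hfd]
        exact (Int.ediv_lt_iff_lt_mul (by omega)).2 (by nlinarith)
      have hrec := ih (PySem.Int.floordiv n d).toNat (by omega)
        (PySem.Int.floordiv n d) rfl hn' (f.insert d (c + 1)) (c + 1)
        (PySem.Dict.get?_insert_self f d (c + 1))
      rw [hrec]
      have hs : strip n d = ((strip (PySem.Int.floordiv n d) d).1,
          (strip (PySem.Int.floordiv n d) d).2 + 1) := by
        rw [strip, dif_pos ⟨by omega, hd, hg.2.2⟩]
      rw [hs]
      have hnn := strip_snd_nonneg (PySem.Int.floordiv n d) d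
      by_cases hz : (strip (PySem.Int.floordiv n d) d).2 = 0
      · rw [if_pos hz, if_neg (by omega), hz]
        norm_num
      · rw [if_neg hz, if_neg (by omega), PySem.Dict.insert_insert_self]
        congr 2
        ring
    · rw [dif_neg hg]
      have hsg : ¬ (1 < n ∧ 2 ≤ d ∧ PySem.Int.mod n d = 0) := by
        intro hc
        exact hg ⟨by omega, hc.2⟩
      rw [strip, dif_neg hsg]
      simp

theorem pfInner_eq_none (d : Int) (hd : 2 ≤ d) (n : Int) (hn : 1 ≤ n)
    (f : PySem.Dict Int Int) (hf : f.get? d = none) :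
    pfInner n d f = ((strip n d).1,
      if (strip n d).2 = 0 then f else f.insert d ((strip n d).2)) := by
  rw [pfInner]
  by_cases hg : 1 ≤ n ∧ 2 ≤ d ∧ PySem.Int.mod n d = 0
  · rw [dif_pos hg]
    simp only [hf]
    have hdvd : d ∣ n := (PySem.Int.mod_eq_zero_iff_dvd n d).1 hg.2.2
    have hpx : d ≤ n := Int.le_of_dvd (by omega) hdvd
    have hfd : PySem.Int.floordiv n d = n / d := PySem.Int.floordiv_eq_ediv_of_pos (by omega)
    have hn' : 1 ≤ PySem.Int.floordiv n d := by
      rw [hfd]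
      rw [Int.le_ediv_iff_mul_le (show (0:Int) < d by omega)]
      omega
    have hrec := pfInner_eq_some d hd (PySem.Int.floordiv n d).toNat
      (PySem.Int.floordiv n d) rfl hn' (f.insert d 1) 1
      (PySem.Dict.get?_insert_self f d 1)
    rw [hrec]
    have hs : strip n d = ((strip (PySem.Int.floordiv n d) d).1,
        (strip (PySem.Int.floordiv n d) d).2 + 1) := by
      rw [strip, dif_pos ⟨by omega, hd, hg.2.2⟩]
    rw [hs]
    have hnn := strip_snd_nonneg (PySem.Int.floordiv n d) d
    by_cases hz : (strip (PySem.Int.floordiv n d) d).2 = 0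
    · rw [if_pos hz, if_neg (by omega), hz]
      norm_num
    · rw [if_neg hz, if_neg (by omega), PySem.Dict.insert_insert_self]
      congr 2
      ring
  · rw [dif_neg hg]
    have hsg : ¬ (1 < n ∧ 2 ≤ d ∧ PySem.Int.mod n d = 0) := by
      intro hc
      exact hg ⟨by omega, hc.2⟩
    rw [strip, dif_neg hsg]
    simp

-- one step / stop of pfRun
theorem pfRun_step (a d : Int) (f : PySem.Dict Int Int) (h : d * d ≤ a ∧ 2 ≤ d) :
    pfRun a d f = pfRun (pfInner a d f).1 (d + 1) (pfInner a d f).2 := by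
  unfold pfRun
  rw [pfOuter, dif_pos h]

theorem pfRun_stop (a d : Int) (f : PySem.Dict Int Int) (h : ¬ (d * d ≤ a ∧ 2 ≤ d)) :
    pfRun a d f = if 1 < a then f.insert a 1 else f := by
  unfold pfRun
  rw [pfOuter, dif_neg h]

-- the leftover (and every later key) is at least d
theorem nofac_ge (a d : Int) (ha : 1 < a) (hd : 2 ≤ d) (hnf : NoFac a d) : d ≤ a := by
  by_contra hc
  exact hnf a (by omega) (by omega) dvd_rfl

-- the items of A's factorization dict are exactly specList
theorem pfRun_items : ∀ (a d : Int), ∀ f : PySem.Dict Int Int, 1 ≤ a → 2 ≤ d → NoFac a d →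
    (∀ q, d ≤ q → f.get? q = none) →
    (pfRun a d f).items = f.items ++ specList a d := by
  intro a d
  induction a, d using specList.induct with
  | case1 a d h hm ih =>
    intro f ha hd hnf hf
    have hdvd : d ∣ a := (PySem.Int.mod_eq_zero_iff_dvd a d).1 hm
    have hInner := pfInner_eq_none d h.2 a ha f (hf d le_rfl)
    have hk : (strip a d).2 ≠ 0 := by
      intro hz
      exact ((strip_snd_eq_zero_iff d h.2 a ha).1 hz) hdvd
    rw [if_neg hk] at hInner
    rw [pfRun_step a d f h, hInner]
    have ha1 : 1 ≤ (strip a d).1 := (strip_spec d h.2 a ha).2.1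
    have hrec := ih (f.insert d ((strip a d).2)) ha1 (by omega)
      (nofac_strip a d ha h.2 hnf)
      (by
        intro q hq
        rw [PySem.Dict.get?_insert_of_ne f ((strip a d).2) (show q ≠ d by omega)]
        exact hf q (by omega))
    rw [hrec, PySem.Dict.items_insert_of_not_contains f _
      ((PySem.Dict.get?_eq_none_iff_contains f d).1 (hf d le_rfl))]
    have hspec : specList a d = (d, (strip a d).2) :: specList (strip a d).1 (d + 1) := by
      rw [specList, dif_pos h, if_pos hm]
    rw [hspec]
    simp
  | case2 a d h hm ih =>
    intro f ha hd hnf hf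
    have hnd : ¬ d ∣ a := fun hdvd => hm ((PySem.Int.mod_eq_zero_iff_dvd a d).2 hdvd)
    have hInner : pfInner a d f = (a, f) := by
      rw [pfInner, dif_neg (by intro hc; exact hm hc.2.2)]
    rw [pfRun_step a d f h, hInner]
    have hrec := ih f ha (by omega) (nofac_step a d hnf hnd)
      (fun q hq => hf q (by omega))
    have hspec : specList a d = specList a (d + 1) := by
      rw [specList, dif_pos h, if_neg hm]
    rw [hrec, hspec]
  | case3 a d h h1 =>
    intro f ha hd hnf hf
    rw [pfRun_stop a d f h, specList, dif_neg h]
    have hda : d ≤ a := nofac_ge a d h1 hd hnf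
    rw [if_pos h1, if_pos h1, PySem.Dict.items_insert_of_not_contains f _
      ((PySem.Dict.get?_eq_none_iff_contains f a).1 (hf a hda))]
  | case4 a d h h1 =>
    intro f ha hd hnf hf
    rw [pfRun_stop a d f h, specList, dif_neg h, if_neg h1, if_neg h1]
    simp

-- lookups in a factorization dict: below d unchanged, at a prime p ≥ d the strip count
theorem pfRun_get? : ∀ (b d : Int), ∀ f : PySem.Dict Int Int, 1 ≤ b → 2 ≤ d → NoFac b d →
    (∀ q, d ≤ q → f.get? q = none) →
    (∀ q, q < d → (pfRun b d f).get? q = f.get? q) ∧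
    (∀ p, 2 ≤ p → p.toNat.Prime → d ≤ p →
      (pfRun b d f).get? p =
        if (strip b p).2 = 0 then none else some ((strip b p).2)) := by
  intro b d
  induction b, d using specList.induct with
  | case1 b d h hm ih =>
    intro f hb hd hnf hf
    have hdvd : d ∣ b := (PySem.Int.mod_eq_zero_iff_dvd b d).1 hm
    have hInner := pfInner_eq_none d h.2 b hb f (hf d le_rfl)
    have hk : (strip b d).2 ≠ 0 := by
      intro hz
      exact ((strip_snd_eq_zero_iff d h.2 b hb).1 hz) hdvd
    rw [if_neg hk] at hInner
    have hb1 : 1 ≤ (strip b d).1 := (strip_spec d h.2 b hb).2.1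
    have hdp : d.toNat.Prime := smallest_divisor_prime b d h.2 hb hdvd hnf
    obtain ⟨ih1, ih2⟩ := ih (f.insert d ((strip b d).2)) hb1 (by omega)
      (nofac_strip b d hb h.2 hnf)
      (by
        intro q hq
        rw [PySem.Dict.get?_insert_of_ne f ((strip b d).2) (show q ≠ d by omega)]
        exact hf q (by omega))
    rw [pfRun_step b d f h, hInner]
    constructor
    · intro q hq
      rw [ih1 q (by omega), PySem.Dict.get?_insert_of_ne f ((strip b d).2) (show q ≠ d by omega)]
    · intro p hp2 hpp hdp'
      rcases eq_or_lt_of_le hdp' with he | hgt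
      · rw [ih1 p (by omega), ← he, PySem.Dict.get?_insert_self, if_neg hk]
      · rw [ih2 p hp2 hpp (by omega)]
        have hcnt : (strip (strip b d).1 p).2 = (strip b p).2 := by
          have e1 := strip_count_eq_factorization p hp2 hpp (strip b d).1 hb1
          have e2 := strip_count_eq_factorization p hp2 hpp b hb
          have hmul := (strip_spec d h.2 b hb).1
          have hnatmul : ((strip b d).1).toNat * d.toNat ^ ((strip b d).2).toNat
              = b.toNat := by
            have hnn := strip_snd_nonneg b d
            have : (((strip b d).1).toNat * d.toNat ^ ((strip b d).2).toNat : Int)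
                = (b.toNat : Int) := by
              rw [Int.toNat_of_nonneg (by omega), Int.toNat_of_nonneg (by omega),
                Int.toNat_of_nonneg (by omega)]
              exact hmul
            exact_mod_cast this
          have hfac : b.toNat.factorization p.toNat
              = ((strip b d).1).toNat.factorization p.toNat := by
            rw [← hnatmul, Nat.factorization_mul (by omega)
              (pow_ne_zero _ (by omega)), Nat.factorization_pow]
            have hne : p.toNat ≠ d.toNat := by omega
            simp [Nat.Prime.factorization hdp, hne]
          have hnn1 := strip_snd_nonneg (strip b d).1 p
          have hnn2 := strip_snd_nonneg b p
          omega
        rw [hcnt]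
  | case2 b d h hm ih =>
    intro f hb hd hnf hf
    have hnd : ¬ d ∣ b := fun hdvd => hm ((PySem.Int.mod_eq_zero_iff_dvd b d).2 hdvd)
    have hInner : pfInner b d f = (b, f) := by
      rw [pfInner, dif_neg (by intro hc; exact hm hc.2.2)]
    obtain ⟨ih1, ih2⟩ := ih f hb (by omega) (nofac_step b d hnf hnd)
      (fun q hq => hf q (by omega))
    rw [pfRun_step b d f h, hInner]
    constructor
    · intro q hq
      exact ih1 q (by omega)
    · intro p hp2 hpp hdp'
      rcases eq_or_lt_of_le hdp' with he | hgt
      · rw [ih1 p (by omega), ← he, hf d le_rfl, if_pos]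
        exact (strip_snd_eq_zero_iff d (by omega) b hb).2 hnd
      · exact ih2 p hp2 hpp (by omega)
  | case3 b d h h1 =>
    intro f hb hd hnf hf
    rw [pfRun_stop b d f h]
    have hblt : b < d * d := by
      by_contra hc
      exact h ⟨by omega, hd⟩
    have hdb : d ≤ b := nofac_ge b d h1 hd hnf
    rw [if_pos h1]
    constructor
    · intro q hq
      rw [PySem.Dict.get?_insert_of_ne f 1 (show q ≠ b by omega)]
    · intro p hp2 hpp hdp'
      by_cases hpb : p = b
      · rw [hpb, PySem.Dict.get?_insert_self]
        have : (strip b b).2 = 1 := strip_self b (by omega)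
        rw [this]
        norm_num
      · rw [PySem.Dict.get?_insert_of_ne f 1 hpb, hf p hdp']
        have hnd : ¬ p ∣ b := by
          intro hdvd
          obtain ⟨c, hc⟩ := hdvd
          have hc1 : 0 < c := by nlinarith
          have hcne : c ≠ 1 := by
            intro he
            rw [he, mul_one] at hc
            exact hpb (by omega)
          have h5 : p * c < p * d := by nlinarith
          have hcd : c < d := lt_of_mul_lt_mul_left h5 (by omega)
          exact hnf c (by omega) hcd ⟨p, by rw [hc]; ring⟩
        rw [if_pos ((strip_snd_eq_zero_iff p hp2 b hb).2 hnd)]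
  | case4 b d h h1 =>
    intro f hb hd hnf hf
    rw [pfRun_stop b d f h, if_neg h1]
    refine ⟨fun q hq => rfl, ?_⟩
    intro p hp2 hpp hdp'
    rw [hf p hdp']
    have hb1 : b = 1 := by omega
    have hnd : ¬ p ∣ b := by
      rw [hb1]
      intro hdvd
      have := Int.le_of_dvd (by omega) hdvd
      omega
    rw [if_pos ((strip_snd_eq_zero_iff p hp2 b hb).2 hnd)]

-- A's dict lookup at any prime p is the strip count of the ORIGINAL B
theorem FB_get? (B p : Int) (hp2 : 2 ≤ p) (hpp : p.toNat.Prime) :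
    (prime_factors B).get? p =
      if (strip B p).2 = 0 then none else some ((strip B p).2) := by
  by_cases hB : 1 ≤ B
  · rw [prime_factors_eq_pfRun]
    exact (pfRun_get? B 2 PySem.Dict.empty hB le_rfl (nofac_two B)
      (fun q _ => PySem.Dict.get?_empty q)).2 p hp2 hpp hp2
  · rw [prime_factors_eq_pfRun, pfRun_stop B 2 PySem.Dict.empty (by omega),
      if_neg (by omega), strip, dif_neg (by omega)]
    simp [PySem.Dict.get?_empty]

theorem mnLoop_nil (bf : PySem.Dict Int Int) (n : Int) : mnLoop [] bf n = n := rfl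

theorem mnLoop_cons_none (p ac : Int) (rest : List (Int × Int)) (bf : PySem.Dict Int Int)
    (n : Int) (h : bf.get? p = none) : mnLoop ((p, ac) :: rest) bf n = -1 := by
  simp [mnLoop, h]

theorem mnLoop_cons_some (p ac : Int) (rest : List (Int × Int)) (bf : PySem.Dict Int Int)
    (n bc : Int) (h : bf.get? p = some bc) :
    mnLoop ((p, ac) :: rest) bf n
      = mnLoop rest bf (max n (PySem.Int.floordiv (ac + bc - 1) bc)) := by
  simp [mnLoop, h]

-- ============ generic number-theoretic facts about badB / reqB ============

theorem mem_primeFactors_iff_fact_ne (a p : ℕ) :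
    p ∈ a.primeFactors ↔ a.factorization p ≠ 0 := by
  rw [← Nat.support_factorization, Finsupp.mem_support_iff]

-- decomposition a = p^e * a' with p prime, p ∤ a': primeFactors and factorization split
theorem fact_split (dN eN a'N : ℕ) (hd : dN.Prime) (he : 1 ≤ eN) (ha' : 1 ≤ a'N)
    (hnd : ¬ dN ∣ a'N) :
    (dN ^ eN * a'N).primeFactors = insert dN a'N.primeFactors ∧
    dN ∉ a'N.primeFactors ∧
    (dN ^ eN * a'N).factorization dN = eN ∧
    (∀ p, p ≠ dN → (dN ^ eN * a'N).factorization p = a'N.factorization p) := by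
  have hpe : dN ^ eN ≠ 0 := pow_ne_zero _ hd.pos.ne'
  have ha0 : a'N ≠ 0 := by omega
  have hmem : dN ∉ a'N.primeFactors := by
    intro hmem
    exact hnd (Nat.mem_primeFactors.1 hmem).2.1
  have hfac : (dN ^ eN * a'N).factorization
      = Finsupp.single dN eN + a'N.factorization := by
    rw [Nat.factorization_mul hpe ha0, Nat.Prime.factorization_pow hd]
  refine ⟨?_, hmem, ?_, ?_⟩
  · rw [Nat.primeFactors_mul hpe ha0, Nat.primeFactors_prime_pow (by omega) hd]
    ext q
    simp [Finset.mem_insert]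
  · rw [hfac]
    have : a'N.factorization dN = 0 := by
      by_contra hc
      exact hmem ((mem_primeFactors_iff_fact_ne a'N dN).2 hc)
    simp [this]
  · intro p hp
    rw [hfac]
    simp [hp.symm]

theorem badB_one (b : ℕ) : ¬ badB b 1 := by
  simp [badB]

theorem reqB_one (b : ℕ) : reqB b 1 = 0 := by
  simp [reqB]

-- sup of (g + 1) over a nonempty finset
theorem sup_add_one {s : Finset ℕ} (hne : s.Nonempty) (g : ℕ → ℕ) :
    s.sup (fun p => g p + 1) = s.sup g + 1 := by
  apply le_antisymm
  · exact Finset.sup_le fun p hp => by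
      have := Finset.le_sup (f := g) hp
      omega
  · obtain ⟨p, hp, he⟩ := Finset.exists_mem_eq_sup s hne g
    rw [he]
    exact Finset.le_sup (f := fun p => g p + 1) hp

-- the key step of B's correctness: one division by gcd(a, b) lowers every needed
-- ceiling by exactly one
theorem req_step (bN aN a'N : ℕ) (ha : 2 ≤ aN) (hbad : ¬ badB bN aN)
    (he : ∀ p, a'N.factorization p
      = aN.factorization p - min (aN.factorization p) (bN.factorization p)) :
    reqB bN aN = reqB bN a'N + 1 := by
  have hbpos : ∀ p ∈ aN.primeFactors, 1 ≤ bN.factorization p := by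
    intro p hp
    by_contra hc
    exact hbad ⟨p, hp, by omega⟩
  have hS'S : a'N.primeFactors ⊆ aN.primeFactors := by
    intro p hp
    rw [mem_primeFactors_iff_fact_ne] at hp ⊢
    have := he p
    omega
  have key1 : ∀ p ∈ a'N.primeFactors,
      (aN.factorization p + bN.factorization p - 1) / bN.factorization p
        = (a'N.factorization p + bN.factorization p - 1) / bN.factorization p + 1 := by
    intro p hp
    have hp' := hS'S hp
    have hb1 := hbpos p hp'
    rw [mem_primeFactors_iff_fact_ne] at hp
    have hep := he p
    have hsum : aN.factorization p = a'N.factorization p + bN.factorization p := by omega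
    rw [hsum]
    have : a'N.factorization p + bN.factorization p + bN.factorization p - 1
        = (a'N.factorization p + bN.factorization p - 1) + bN.factorization p := by omega
    rw [this, Nat.add_div_right _ (by omega)]
  have key2 : ∀ p ∈ aN.primeFactors \ a'N.primeFactors,
      (aN.factorization p + bN.factorization p - 1) / bN.factorization p = 1 := by
    intro p hp
    rw [Finset.mem_sdiff] at hp
    obtain ⟨hpS, hpn⟩ := hp
    have hb1 := hbpos p hpS
    have hap : aN.factorization p ≠ 0 := (mem_primeFactors_iff_fact_ne aN p).1 hpS
    have ha'0 : a'N.factorization p = 0 := by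
      by_contra hc
      exact hpn ((mem_primeFactors_iff_fact_ne a'N p).2 hc)
    have hep := he p
    have hle : aN.factorization p ≤ bN.factorization p := by omega
    exact Nat.div_eq_of_lt_le (by omega) (by omega)
  have hSne : aN.primeFactors.Nonempty := Nat.nonempty_primeFactors.2 (by omega)
  by_cases hS' : a'N.primeFactors = ∅
  · rw [reqB, reqB, hS']
    simp only [Finset.sup_empty]
    have hall : ∀ p ∈ aN.primeFactors,
        (aN.factorization p + bN.factorization p - 1) / bN.factorization p = 1 := by
      intro p hp
      exact key2 p (by rw [Finset.mem_sdiff, hS']; exact ⟨hp, by simp⟩)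
    apply le_antisymm
    · exact Finset.sup_le fun p hp => le_of_eq (hall p hp)
    · obtain ⟨p, hp⟩ := hSne
      calc (0 : ℕ) + 1 = 1 := by omega
        _ = _ := (hall p hp).symm
        _ ≤ _ := Finset.le_sup
          (f := fun p => (aN.factorization p + bN.factorization p - 1) / bN.factorization p) hp
  · have hS'ne : a'N.primeFactors.Nonempty := Finset.nonempty_iff_ne_empty.2 hS'
    have hunion : a'N.primeFactors ∪ (aN.primeFactors \ a'N.primeFactors)
        = aN.primeFactors := Finset.union_sdiff_of_subset hS'S
    rw [reqB, ← hunion, Finset.sup_union]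
    have hsup1 : a'N.primeFactors.sup
        (fun p => (aN.factorization p + bN.factorization p - 1) / bN.factorization p)
        = reqB bN a'N + 1 := by
      rw [Finset.sup_congr rfl key1]
      exact sup_add_one hS'ne _
    have hsup2 : (aN.primeFactors \ a'N.primeFactors).sup
        (fun p => (aN.factorization p + bN.factorization p - 1) / bN.factorization p) ≤ 1 :=
      Finset.sup_le fun p hp => le_of_eq (key2 p hp)
    rw [hsup1]
    exact max_eq_left (by omega)

-- ============ characterization of A's loop over specList ============

-- the strip count over B of a prime p, as the factorization of B.toNat (2 ≤ B)
theorem stripB_fact (B p : Int) (hB : 2 ≤ B) (hp2 : 2 ≤ p) (hpp : p.toNat.Prime) :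
    (strip B p).2 = ((B.toNat.factorization p.toNat : ℕ) : Int) := by
  have := strip_count_eq_factorization p hp2 hpp B (by omega)
  have hnn := strip_snd_nonneg B p
  omega

-- A's merge loop, when some prime of a is missing from B
theorem mnLoop_bad (B : Int) (hB : 2 ≤ B) : ∀ (a d : Int), ∀ n : Int, 1 ≤ a → 2 ≤ d →
    NoFac a d → badB B.toNat a.toNat →
    mnLoop (specList a d) (prime_factors B) n = -1 := by
  intro a d
  induction a, d using specList.induct with
  | case1 a d h hm ih =>
    intro n ha hd hnf hbad
    have hdvd : d ∣ a := (PySem.Int.mod_eq_zero_iff_dvd a d).1 hm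
    have hdp : d.toNat.Prime := smallest_divisor_prime a d h.2 ha hdvd hnf
    rw [specList, dif_pos h, if_pos hm]
    have ha1 : 1 ≤ (strip a d).1 := (strip_spec d h.2 a ha).2.1
    -- the Nat-level decomposition a.toNat = d^e * a'
    obtain ⟨hmul, -, -⟩ := strip_spec d h.2 a ha
    have hk : (strip a d).2 ≠ 0 := fun hz =>
      ((strip_snd_eq_zero_iff d h.2 a ha).1 hz) hdvd
    have hnn := strip_snd_nonneg a d
    have hnatmul : d.toNat ^ ((strip a d).2).toNat * ((strip a d).1).toNat = a.toNat := by
      have : (d.toNat ^ ((strip a d).2).toNat * ((strip a d).1).toNat : Int)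
          = (a.toNat : Int) := by
        rw [Int.toNat_of_nonneg (by omega), Int.toNat_of_nonneg (by omega),
          Int.toNat_of_nonneg (by omega)]
        rw [mul_comm]; exact hmul
      exact_mod_cast this
    have hndN : ¬ d.toNat ∣ ((strip a d).1).toNat := by
      intro hdn
      apply strip_res_not_dvd d h.2 a ha
      have : (d.toNat : Int) ∣ (((strip a d).1).toNat : Int) := Int.natCast_dvd_natCast.mpr hdn
      rwa [Int.toNat_of_nonneg (by omega), Int.toNat_of_nonneg (by omega)] at this
    obtain ⟨hpf, hmem, hfd, hfo⟩ := fact_split d.toNat ((strip a d).2).toNat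
      ((strip a d).1).toNat hdp (by omega) (by omega) hndN
    rw [hnatmul] at hpf hfd hfo
    by_cases hz : (strip B d).2 = 0
    · exact mnLoop_cons_none _ _ _ _ _ (by rw [FB_get? B d h.2 hdp, if_pos hz])
    · rw [mnLoop_cons_some _ _ _ _ _ _ (by rw [FB_get? B d h.2 hdp, if_neg hz])]
      apply ih _ ha1 (by omega) (nofac_strip a d ha h.2 hnf)
      -- the bad prime is not d (B has d), so it survives in a'
      obtain ⟨p, hp, hbp⟩ := hbad
      have hpd : p ≠ d.toNat := by
        intro he
        rw [he] at hbp
        rw [stripB_fact B d hB h.2 hdp] at hz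
        omega
      refine ⟨p, ?_, hbp⟩
      rw [hpf, Finset.mem_insert] at hp
      rcases hp with hp | hp
      · exact absurd hp hpd
      · exact hp
  | case2 a d h hm ih =>
    intro n ha hd hnf hbad
    have hnd : ¬ d ∣ a := fun hdvd => hm ((PySem.Int.mod_eq_zero_iff_dvd a d).2 hdvd)
    rw [specList, dif_pos h, if_neg hm]
    exact ih n ha (by omega) (nofac_step a d hnf hnd) hbad
  | case3 a d h h1 =>
    intro n ha hd hnf hbad
    have hblt : a < d * d := by
      by_contra hc
      exact h ⟨by omega, hd⟩
    have hap : a.toNat.Prime := leftover_prime a d h1 hd hblt hnf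
    rw [specList, dif_neg h, if_pos h1]
    -- the only prime of a is a itself, so its exponent in B is 0
    obtain ⟨p, hp, hbp⟩ := hbad
    rw [hap.primeFactors, Finset.mem_singleton] at hp
    subst hp
    have hz : (strip B a).2 = 0 := by
      rw [stripB_fact B a hB (by omega) hap]
      omega
    exact mnLoop_cons_none _ _ _ _ _ (by rw [FB_get? B a (by omega) hap, if_pos hz])
  | case4 a d h h1 =>
    intro n ha hd hnf hbad
    have : a.toNat = 1 := by omega
    rw [this] at hbad
    exact absurd hbad (badB_one _)

-- A's merge loop, when every prime of a occurs in B
theorem mnLoop_good (B : Int) (hB : 2 ≤ B) : ∀ (a d : Int), ∀ n : Int, 1 ≤ a → 2 ≤ d →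
    NoFac a d → ¬ badB B.toNat a.toNat → 0 ≤ n →
    mnLoop (specList a d) (prime_factors B) n = max n ((reqB B.toNat a.toNat : ℕ) : Int) := by
  intro a d
  induction a, d using specList.induct with
  | case1 a d h hm ih =>
    intro n ha hd hnf hbad hn
    have hdvd : d ∣ a := (PySem.Int.mod_eq_zero_iff_dvd a d).1 hm
    have hdp : d.toNat.Prime := smallest_divisor_prime a d h.2 ha hdvd hnf
    rw [specList, dif_pos h, if_pos hm]
    have ha1 : 1 ≤ (strip a d).1 := (strip_spec d h.2 a ha).2.1
    obtain ⟨hmul, -, -⟩ := strip_spec d h.2 a ha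
    have hk : (strip a d).2 ≠ 0 := fun hz =>
      ((strip_snd_eq_zero_iff d h.2 a ha).1 hz) hdvd
    have hnn := strip_snd_nonneg a d
    have hnatmul : d.toNat ^ ((strip a d).2).toNat * ((strip a d).1).toNat = a.toNat := by
      have : (d.toNat ^ ((strip a d).2).toNat * ((strip a d).1).toNat : Int)
          = (a.toNat : Int) := by
        rw [Int.toNat_of_nonneg (by omega), Int.toNat_of_nonneg (by omega),
          Int.toNat_of_nonneg (by omega)]
        rw [mul_comm]; exact hmul
      exact_mod_cast this
    have hndN : ¬ d.toNat ∣ ((strip a d).1).toNat := by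
      intro hdn
      apply strip_res_not_dvd d h.2 a ha
      have : (d.toNat : Int) ∣ (((strip a d).1).toNat : Int) := Int.natCast_dvd_natCast.mpr hdn
      rwa [Int.toNat_of_nonneg (by omega), Int.toNat_of_nonneg (by omega)] at this
    obtain ⟨hpf, hmem, hfd, hfo⟩ := fact_split d.toNat ((strip a d).2).toNat
      ((strip a d).1).toNat hdp (by omega) (by omega) hndN
    rw [hnatmul] at hpf hfd hfo
    -- B contains d (else d itself would witness badB)
    have hdmem : d.toNat ∈ a.toNat.primeFactors := by
      rw [hpf]; exact Finset.mem_insert_self _ _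
    have hbd : B.toNat.factorization d.toNat ≠ 0 := by
      intro hz
      exact hbad ⟨d.toNat, hdmem, hz⟩
    have hz : (strip B d).2 ≠ 0 := by
      rw [stripB_fact B d hB h.2 hdp]
      omega
    rw [mnLoop_cons_some _ _ _ _ _ _ (by rw [FB_get? B d h.2 hdp, if_neg hz])]
    have hbad' : ¬ badB B.toNat ((strip a d).1).toNat := by
      intro ⟨p, hp, hbp⟩
      exact hbad ⟨p, by rw [hpf]; exact Finset.mem_insert_of_mem hp, hbp⟩
    have hbc1 : 1 ≤ (strip B d).2 := by
      have := strip_snd_nonneg B d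
      omega
    have hbfact : (strip B d).2 = ((B.toNat.factorization d.toNat : ℕ) : Int) :=
      stripB_fact B d hB h.2 hdp
    have hc : PySem.Int.floordiv ((strip a d).2 + (strip B d).2 - 1) ((strip B d).2)
        = (((((strip a d).2).toNat + B.toNat.factorization d.toNat - 1)
            / B.toNat.factorization d.toNat : ℕ) : Int) := by
      rw [PySem.Int.floordiv_eq_ediv_of_pos (by omega), Int.natCast_div]
      congr 1 <;> omega
    have hreq : reqB B.toNat a.toNat
        = max ((((strip a d).2).toNat + B.toNat.factorization d.toNat - 1)
            / B.toNat.factorization d.toNat)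
          (reqB B.toNat ((strip a d).1).toNat) := by
      rw [reqB, hpf, Finset.sup_insert, hfd]
      rw [reqB, Finset.sup_congr rfl
        (fun p hp => by rw [hfo p (by rintro rfl; exact hmem hp)])]
    rw [hc, ih _ ha1 (by omega) (nofac_strip a d ha h.2 hnf) hbad' (by positivity),
      hreq, Nat.cast_max]
    exact max_assoc n _ _
  | case2 a d h hm ih =>
    intro n ha hd hnf hbad hn
    have hnd : ¬ d ∣ a := fun hdvd => hm ((PySem.Int.mod_eq_zero_iff_dvd a d).2 hdvd)
    rw [specList, dif_pos h, if_neg hm]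
    exact ih n ha (by omega) (nofac_step a d hnf hnd) hbad hn
  | case3 a d h h1 =>
    intro n ha hd hnf hbad hn
    have hblt : a < d * d := by
      by_contra hc
      exact h ⟨by omega, hd⟩
    have hap : a.toNat.Prime := leftover_prime a d h1 hd hblt hnf
    rw [specList, dif_neg h, if_pos h1]
    have hbd : B.toNat.factorization a.toNat ≠ 0 := by
      intro hzn
      exact hbad ⟨a.toNat, by rw [hap.primeFactors]; exact Finset.mem_singleton_self _, hzn⟩
    have hz : (strip B a).2 ≠ 0 := by
      rw [stripB_fact B a hB (by omega) hap]
      omega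
    rw [mnLoop_cons_some _ _ _ _ _ _ (by rw [FB_get? B a (by omega) hap, if_neg hz]),
      mnLoop_nil]
    have hbc1 : 1 ≤ (strip B a).2 := by
      have := strip_snd_nonneg B a
      omega
    have hbfact : (strip B a).2 = ((B.toNat.factorization a.toNat : ℕ) : Int) :=
      stripB_fact B a hB (by omega) hap
    have hc : PySem.Int.floordiv (1 + (strip B a).2 - 1) ((strip B a).2) = 1 := by
      have h11 : (1 : Int) + (strip B a).2 - 1 = (strip B a).2 := by ring
      rw [h11, PySem.Int.floordiv_eq_ediv_of_pos (by omega)]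
      exact Int.ediv_self (by omega)
    have hreq : reqB B.toNat a.toNat = 1 := by
      rw [reqB, hap.primeFactors, Finset.sup_singleton]
      have hfs : a.toNat.factorization a.toNat = 1 := Nat.Prime.factorization_self hap
      rw [hfs]
      have hb1 : 1 ≤ B.toNat.factorization a.toNat := by omega
      have h11 : (1 : ℕ) + B.toNat.factorization a.toNat - 1
          = B.toNat.factorization a.toNat := by omega
      rw [h11, Nat.div_self (by omega)]
    rw [hc, hreq]
    norm_num
  | case4 a d h h1 =>
    intro n ha hd hnf hbad hn
    have ha1 : a.toNat = 1 := by omega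
    rw [specList, dif_neg h, if_neg h1, mnLoop_nil, ha1, reqB_one]
    simp
    omega

-- ============ characterization of B's gcd chain ============

-- the Euclid loop on nonnegative inputs is Int.gcd
theorem gcdLoop_eq_gcd : ∀ (k : ℕ) (y : Int), y.natAbs = k → ∀ x : Int, 0 ≤ x → 0 ≤ y →
    gcdLoop x y = ((Int.gcd x y : ℕ) : Int) := by
  intro k
  induction k using Nat.strong_induction_on with
  | _ k ih =>
    intro y hk x hx hy
    rw [gcdLoop]
    by_cases h0 : y = 0
    · subst h0
      rw [dif_neg (by simp)]
      rw [Int.gcd_zero_right]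
      omega
    · rw [dif_pos h0]
      have hypos : 0 < y := by omega
      have hmod : PySem.Int.mod x y = x % y := PySem.Int.mod_eq_emod_of_pos hypos
      have hmnn : 0 ≤ x % y := Int.emod_nonneg x (by omega)
      have hmlt : x % y < y := Int.emod_lt_of_pos x hypos
      rw [hmod, ih (x % y).natAbs (by omega) (x % y) rfl y (by omega) hmnn]
      congr 1
      -- Int.gcd y (x % y) = Int.gcd x y via Nat.gcd_rec
      have hxN : x.natAbs = x.toNat := by omega
      have hyN : y.natAbs = y.toNat := by omega
      have hmN : (x % y).natAbs = x.toNat % y.toNat := by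
        have hcast : ((x.toNat % y.toNat : ℕ) : Int) = x % y := by
          rw [Int.natCast_mod, Int.toNat_of_nonneg hx, Int.toNat_of_nonneg hy]
        omega
      rw [Int.gcd, Int.gcd, hxN, hyN, hmN]
      rw [Nat.gcd_comm y.toNat (x.toNat % y.toNat), ← Nat.gcd_rec, Nat.gcd_comm]

-- the chain hits -1 exactly on badB
theorem chainLoop_bad (B : Int) (hB : 2 ≤ B) : ∀ (k : ℕ) (a : Int), a.toNat = k →
    1 ≤ a → badB B.toNat a.toNat → ∀ n : Int, chainLoop B a n = -1 := by
  intro k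
  induction k using Nat.strong_induction_on with
  | _ k ih =>
    intro a hk ha hbad n
    have ha2 : 2 ≤ a := by
      by_contra hc
      have : a.toNat = 1 := by omega
      rw [this] at hbad
      exact badB_one _ hbad
    rw [chainLoop, dif_pos (by omega)]
    have hg := gcdLoop_eq_gcd B.natAbs B rfl a (by omega) (by omega)
    have hgN : Int.gcd a B = Nat.gcd a.toNat B.toNat := by
      rw [Int.gcd]
      congr 1 <;> omega
    by_cases h1 : gcdLoop a B = 1
    · rw [dif_pos h1]
    · rw [dif_neg h1]
      set gN := Nat.gcd a.toNat B.toNat with hgdef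
      have hgval : gcdLoop a B = ((gN : ℕ) : Int) := by rw [hg, hgN]
      have hg1 : gN ≠ 1 := by
        intro he
        rw [hgval, he] at h1
        exact h1 (by norm_num)
      have hg0 : gN ≠ 0 := by
        intro he
        have := Nat.eq_zero_of_gcd_eq_zero_left (hgdef ▸ he)
        omega
      have hg2 : 2 ≤ gN := by omega
      have hgdvd : gN ∣ a.toNat := Nat.gcd_dvd_left _ _
      have hfd : PySem.Int.floordiv a (gcdLoop a B) = ((a.toNat / gN : ℕ) : Int) := by
        rw [hgval, PySem.Int.floordiv_eq_ediv_of_pos (by exact_mod_cast Nat.pos_of_ne_zero hg0),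
          Int.natCast_div]
        congr 1
        all_goals omega
      have ha'pos : 1 ≤ a.toNat / gN :=
        Nat.div_pos (Nat.le_of_dvd (by omega) hgdvd) (by omega)
      have ha'lt : a.toNat / gN < a.toNat := Nat.div_lt_self (by omega) (by omega)
      -- the bad prime survives the division by the gcd
      have hbad' : badB B.toNat (a.toNat / gN) := by
        obtain ⟨p, hp, hbp⟩ := hbad
        have hfa : (a.toNat / gN).factorization p
            = a.toNat.factorization p - gN.factorization p := by
          rw [Nat.factorization_div hgdvd, Finsupp.tsub_apply]
        have hgf : gN.factorization p
            = min (a.toNat.factorization p) (B.toNat.factorization p) := by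
          rw [hgdef, Nat.factorization_gcd (by omega) (by omega), Finsupp.inf_apply]
        have hap : a.toNat.factorization p ≠ 0 := (mem_primeFactors_iff_fact_ne _ _).1 hp
        refine ⟨p, (mem_primeFactors_iff_fact_ne _ _).2 ?_, hbp⟩
        rw [hfa, hgf, hbp]
        omega
      have htn : (((a.toNat / gN : ℕ) : Int)).toNat = a.toNat / gN := by omega
      have hstep := ih (a.toNat / gN) (by omega) (((a.toNat / gN : ℕ) : Int)) htn
        (by exact_mod_cast ha'pos) (by rw [htn]; exact hbad') (n + 1)
      rw [hfd]
      exact hstep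

-- the chain counts exactly reqB steps when nothing is bad
theorem chainLoop_good (B : Int) (hB : 2 ≤ B) : ∀ (k : ℕ) (a : Int), a.toNat = k →
    1 ≤ a → ¬ badB B.toNat a.toNat → ∀ n : Int,
    chainLoop B a n = n + ((reqB B.toNat a.toNat : ℕ) : Int) := by
  intro k
  induction k using Nat.strong_induction_on with
  | _ k ih =>
    intro a hk ha hbad n
    by_cases ha2 : 2 ≤ a
    · rw [chainLoop, dif_pos (by omega)]
      have hg := gcdLoop_eq_gcd B.natAbs B rfl a (by omega) (by omega)
      have hgN : Int.gcd a B = Nat.gcd a.toNat B.toNat := by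
        rw [Int.gcd]
        congr 1 <;> omega
      set gN := Nat.gcd a.toNat B.toNat with hgdef
      have hgval : gcdLoop a B = ((gN : ℕ) : Int) := by rw [hg, hgN]
      -- gcd ≠ 1: the smallest prime of a divides B too
      have hg1 : gN ≠ 1 := by
        intro he
        have hm := Nat.minFac_prime (show a.toNat ≠ 1 by omega)
        have hmd : a.toNat.minFac ∣ a.toNat := Nat.minFac_dvd _
        have hmem : a.toNat.minFac ∈ a.toNat.primeFactors :=
          Nat.mem_primeFactors.2 ⟨hm, hmd, by omega⟩
        have hbp : B.toNat.factorization a.toNat.minFac ≠ 0 := by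
          intro hzz
          exact hbad ⟨_, hmem, hzz⟩
        have hpB : a.toNat.minFac ∣ B.toNat := by
          have := (mem_primeFactors_iff_fact_ne B.toNat a.toNat.minFac).2 hbp
          exact (Nat.mem_primeFactors.1 this).2.1
        have : a.toNat.minFac ∣ gN := Nat.dvd_gcd hmd hpB
        rw [he] at this
        have := Nat.eq_one_of_dvd_one this
        exact hm.one_lt.ne' this
      have hg0 : gN ≠ 0 := by
        intro he
        have := Nat.eq_zero_of_gcd_eq_zero_left (hgdef ▸ he)
        omega
      rw [dif_neg (by rw [hgval]; intro hc; exact hg1 (by exact_mod_cast hc))]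
      have hgdvd : gN ∣ a.toNat := Nat.gcd_dvd_left _ _
      have hfd : PySem.Int.floordiv a (gcdLoop a B) = ((a.toNat / gN : ℕ) : Int) := by
        rw [hgval, PySem.Int.floordiv_eq_ediv_of_pos (by exact_mod_cast Nat.pos_of_ne_zero hg0),
          Int.natCast_div]
        congr 1
        all_goals omega
      have ha'pos : 1 ≤ a.toNat / gN :=
        Nat.div_pos (Nat.le_of_dvd (by omega) hgdvd) (by omega)
      have ha'lt : a.toNat / gN < a.toNat := Nat.div_lt_self (by omega) (by omega)
      have hfa : ∀ p, (a.toNat / gN).factorization p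
          = a.toNat.factorization p
            - min (a.toNat.factorization p) (B.toNat.factorization p) := by
        intro p
        rw [Nat.factorization_div hgdvd, Finsupp.tsub_apply, hgdef,
          Nat.factorization_gcd (by omega) (by omega), Finsupp.inf_apply]
      have hbad' : ¬ badB B.toNat (a.toNat / gN) := by
        intro ⟨p, hp, hbp⟩
        have hap : (a.toNat / gN).factorization p ≠ 0 :=
          (mem_primeFactors_iff_fact_ne _ _).1 hp
        have := hfa p
        refine hbad ⟨p, (mem_primeFactors_iff_fact_ne _ _).2 ?_, hbp⟩
        omega
      have hreq : reqB B.toNat a.toNat = reqB B.toNat (a.toNat / gN) + 1 :=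
        req_step B.toNat a.toNat (a.toNat / gN) (by omega) hbad hfa
      have htn : (((a.toNat / gN : ℕ) : Int)).toNat = a.toNat / gN := by omega
      have hstep := ih (a.toNat / gN) (by omega) (((a.toNat / gN : ℕ) : Int)) htn
        (by exact_mod_cast ha'pos) (by rw [htn]; exact hbad') (n + 1)
      rw [hfd, hstep, htn, hreq]
      push_cast
      ring
    · have ha1 : a.toNat = 1 := by omega
      rw [chainLoop, dif_neg (by omega), ha1, reqB_one]
      simp

-- ============ assembly ============

theorem specList_ne_nil (a d : Int) (ha : 1 < a) (hd : 2 ≤ d) : specList a d ≠ [] := by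
  induction a, d using specList.induct with
  | case1 a d h hm ih => rw [specList, dif_pos h, if_pos hm]; simp
  | case2 a d h hm ih => rw [specList, dif_pos h, if_neg hm]; exact ih ha (by omega)
  | case3 a d h h1 => rw [specList, dif_neg h, if_pos h1]; simp
  | case4 a d h h1 => exact absurd ha h1

theorem min_n_eq (A B : Int) : min_n A B = min_n_alt A B := by
  by_cases hA : A < 2
  · -- A has no prime factors: A's loop runs over an empty dict, B returns 0 directly
    unfold min_n min_n_alt
    rw [if_pos hA, prime_factors_eq_pfRun, pfRun_stop A 2 PySem.Dict.empty (by omega),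
      if_neg (by omega)]
    rfl
  · have hA2 : 2 ≤ A := by omega
    have hitems := pfRun_items A 2 PySem.Dict.empty (by omega) le_rfl (nofac_two A)
      (fun q _ => PySem.Dict.get?_empty q)
    have hemp : (PySem.Dict.empty : PySem.Dict Int Int).items = [] := rfl
    rw [hemp, List.nil_append] at hitems
    have hitems2 : (prime_factors A).items = specList A 2 := by
      rw [prime_factors_eq_pfRun]; exact hitems
    unfold min_n min_n_alt
    rw [hitems2, if_neg (by omega)]
    by_cases hB : B < 2
    · -- B has no prime factors: A's first lookup misses, B returns -1 directly
      rw [if_pos hB]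
      obtain ⟨⟨p, ac⟩, rest, hcons⟩ :=
        List.exists_cons_of_ne_nil (specList_ne_nil A 2 (by omega) le_rfl)
      rw [hcons]
      apply mnLoop_cons_none
      rw [prime_factors_eq_pfRun, pfRun_stop B 2 PySem.Dict.empty (by omega),
        if_neg (by omega)]
      exact PySem.Dict.get?_empty p
    · have hB2 : 2 ≤ B := by omega
      rw [if_neg hB]
      by_cases hbad : badB B.toNat A.toNat
      · rw [mnLoop_bad B hB2 A 2 0 (by omega) le_rfl (nofac_two A) hbad,
          chainLoop_bad B hB2 A.toNat A rfl (by omega) hbad 0]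
      · rw [mnLoop_good B hB2 A 2 0 (by omega) le_rfl (nofac_two A) hbad le_rfl,
          chainLoop_good B hB2 A.toNat A rfl (by omega) hbad 0]
        simp

-- ===== VERDICT (by name: the statement is the Claim_ definition above) =====
theorem min_n_spec : Claim_equal_min_n := by
  intro A B _
  unfold Spec_min_n
  exact min_n_eq A B
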